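-- pv_equiv track=rewrite | github.com/jagaleanov/EjerciciosDeclarativa | 02-examen.py | mayorListEvens
-- ===== SOURCE A (Python) =====
-- def countEven(lista):
--     return len([x for x in lista if x % 2 == 0])
--
-- def mayorListEvens(listas):
--     if len(listas)==0:
--         return []
--     elif len(listas)==1:
--         return listas[0]
--     else:
--         if countEven(listas[0]) > countEven(listas[1]):
--             return mayorListEvens([listas[0]] + listas[2:])
--         else:
--             return mayorListEvens(listas[1:])
-- ===== SOURCE B (Python) =====
-- def mayorListEvens(listas):
--     if not listas:
--         return []
--     champion = listas[0]
--     best = sum(1 for x in champion if x % 2 == 0)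
--     for l in listas[1:]:
--         c = sum(1 for x in l if x % 2 == 0)
--         if c >= best:
--             champion, best = l, c
--     return champion
-- ===== Notes on version B (the rewrite author's own statement) =====
-- stated objective: simpler
-- what changed: Replaces A's recursive pairwise tournament with list slicing/concatenation by one flat iterative scan keeping the running champion and its even count (update on >=, preserving last-on-tie).
import Mathlib
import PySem

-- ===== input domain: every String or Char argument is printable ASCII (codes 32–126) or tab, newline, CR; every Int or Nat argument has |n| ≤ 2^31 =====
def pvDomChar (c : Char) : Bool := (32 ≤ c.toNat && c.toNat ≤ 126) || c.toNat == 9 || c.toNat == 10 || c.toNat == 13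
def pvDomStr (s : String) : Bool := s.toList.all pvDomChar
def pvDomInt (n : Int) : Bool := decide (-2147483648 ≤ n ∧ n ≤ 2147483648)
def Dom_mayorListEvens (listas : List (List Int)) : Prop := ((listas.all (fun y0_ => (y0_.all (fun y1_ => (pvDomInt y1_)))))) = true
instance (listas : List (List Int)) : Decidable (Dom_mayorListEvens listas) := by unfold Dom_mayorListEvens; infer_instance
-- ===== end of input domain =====

-- B replaces A's recursive pairwise tournament by one flat iterative scan with a running champion: a simpler single-pass decomposition returning the same values.


-- ===== PORT A =====
-- countEven: len([x for x in lista if x % 2 == 0])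
def countEven (lista : List Int) : Int :=
  ((lista.filter (fun x => PySem.Int.mod x 2 == 0)).length : Int)

def mayorListEvens (listas : List (List Int)) : List Int :=
  match listas with
  | [] => []
  | [l] => l
  | a :: b :: rest =>
    if countEven a > countEven b then
      mayorListEvens (a :: rest)    -- [listas[0]] + listas[2:]
    else
      mayorListEvens (b :: rest)    -- listas[1:]
termination_by listas.length

-- ===== PORT B =====
-- B's even count: sum(1 for x in l if x % 2 == 0)
def countEvenB (l : List Int) : Int :=
  l.foldl (fun acc x => if PySem.Int.mod x 2 == 0 then acc + 1 else acc) 0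

def mayorListEvens_alt (listas : List (List Int)) : List Int :=
  match listas with
  | [] => []
  | x :: rest =>
    (rest.foldl
      (fun (st : List Int × Int) l =>
        let c := countEvenB l
        if c ≥ st.2 then (l, c) else st)
      (x, countEvenB x)).1

-- ===== PRECONDITION & SPEC =====
def Spec_mayorListEvens (listas : List (List Int)) (out : List Int) : Prop := out = mayorListEvens_alt listas
instance (listas : List (List Int)) (out : List Int) : Decidable (Spec_mayorListEvens listas out) := by unfold Spec_mayorListEvens; infer_instance

-- ===== CLAIM (what is proved, stated in full; the proofs are below) =====
def Claim_equal_mayorListEvens : Prop := ∀ (listas : List (List Int)), Dom_mayorListEvens listas → Spec_mayorListEvens listas (mayorListEvens listas)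

-- ===== LEMMAS AND PROOFS =====
theorem foldl_count_acc (xs : List Int) (acc : Int) :
    xs.foldl (fun acc x => if PySem.Int.mod x 2 == 0 then acc + 1 else acc) acc
      = acc + xs.foldl (fun acc x => if PySem.Int.mod x 2 == 0 then acc + 1 else acc) 0 := by
  induction xs generalizing acc with
  | nil => simp
  | cons y ys ihy =>
    simp only [List.foldl_cons]
    by_cases hy : (PySem.Int.mod y 2 == 0) = true
    · rw [if_pos hy, if_pos hy, ihy (acc + 1), ihy (0 + 1)]; ring
    · rw [if_neg hy, if_neg hy]; exact ihy acc

theorem countEvenB_eq (l : List Int) : countEvenB l = countEven l := by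
  unfold countEvenB countEven
  induction l with
  | nil => simp
  | cons x xs ih =>
    simp only [List.foldl_cons, List.filter_cons]
    by_cases h : (PySem.Int.mod x 2 == 0) = true
    · rw [if_pos h, if_pos h, foldl_count_acc, ih]
      simp only [List.length_cons]
      push_cast; ring
    · rw [if_neg h, if_neg h, ih]

theorem tournament_eq_scan (rest : List (List Int)) : ∀ (x : List Int),
    mayorListEvens (x :: rest)
      = (rest.foldl
          (fun (st : List Int × Int) l =>
            let c := countEvenB l
            if c ≥ st.2 then (l, c) else st)
          (x, countEvenB x)).1 := by
  induction rest with
  | nil => intro x; simp [mayorListEvens]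
  | cons y ys ih =>
    intro x
    simp only [List.foldl_cons]
    by_cases h : countEven x > countEven y
    · have hne : ¬ (countEvenB y ≥ (x, countEvenB x).2) := by
        simp only [countEvenB_eq]; omega
      rw [mayorListEvens, if_pos h, if_neg hne, ih x]
    · have hge : countEvenB y ≥ (x, countEvenB x).2 := by
        simp only [countEvenB_eq]; omega
      rw [mayorListEvens, if_neg h, if_pos hge, ih y]

-- ===== VERDICT (by name: the statement is the Claim_ definition above) =====
theorem mayorListEvens_spec : Claim_equal_mayorListEvens := by
  intro listas _
  unfold Spec_mayorListEvens mayorListEvens_alt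
  cases listas with
  | nil => simp [mayorListEvens]
  | cons x rest => exact tournament_eq_scan rest x
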